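-- pv_equiv track=rewrite | github.com/kazuhiko1979/edabit | Remove The Word.py | remove_letters
-- ===== SOURCE A (Python) =====
-- from collections import Counter
--
-- def remove_letters(letters, word):
--
--     letters = Counter(''.join(letters))
--     word = Counter(word)
--
--     dst = {}
--
--     for k1, v1 in letters.items():
--         for k2, v2 in word.items():
--             if k1 not in word:
--                 dst[k1] = v1
--             if k1 == k2 and v1 > v2:
--                 dst[k1] = v1
--
--     return sorted(list(dst.keys()))
-- ===== SOURCE B (Python) =====
-- from collections import Counter
--
-- def remove_letters(letters, word):
--     # multiset difference: keep characters whose count in letters exceeds their count in word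
--     diff = Counter(''.join(letters)) - Counter(word)
--     return sorted(diff)
-- ===== Notes on version B (the rewrite author's own statement) =====
-- stated objective: simpler
-- what changed: Replaces A's nested loop over the two counters' items (with its dict of conditional re-insertions) by a single Counter multiset subtraction whose positive-count keys are sorted.
-- intended difference: When word is the empty string (and letters contain at least one character) A returns [] because its inner loop over word's items never runs, while B returns the sorted distinct letters, the intended value since an empty word removes nothing. — e.g. on remove_letters(["ba"], ""): A returns [], B returns ["a", "b"]
import Mathlib
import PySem

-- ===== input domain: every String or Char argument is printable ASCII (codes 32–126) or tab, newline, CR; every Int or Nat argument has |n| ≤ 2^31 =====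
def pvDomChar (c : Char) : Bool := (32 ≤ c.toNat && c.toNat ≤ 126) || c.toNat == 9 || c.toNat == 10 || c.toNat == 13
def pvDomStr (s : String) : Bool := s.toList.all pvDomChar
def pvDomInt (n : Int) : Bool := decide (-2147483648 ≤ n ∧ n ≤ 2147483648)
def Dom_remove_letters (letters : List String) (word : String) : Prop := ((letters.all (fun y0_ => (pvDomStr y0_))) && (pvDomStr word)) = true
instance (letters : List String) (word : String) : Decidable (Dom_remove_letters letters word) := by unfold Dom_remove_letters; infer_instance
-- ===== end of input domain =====

-- B replaces A's nested loop over the two counters' items by one Counter multiset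
-- subtraction (keys with strictly positive difference), sorted; objective: simpler.

-- ===== PORT A =====
def remove_letters (letters : List String) (word : String) : List String :=
  -- letters = Counter(''.join(letters)); word = Counter(word)
  let lcount := PySem.Dict.counter (PySem.Chars.join [] (letters.map String.toList))
  let wcount := PySem.Dict.counter word.toList
  -- dst = {}; the nested for-loops with the two conditional dict writes
  let dst := lcount.items.foldl (fun d p1 =>
      wcount.items.foldl (fun d p2 =>
        let d' := if !(wcount.contains p1.1) then d.insert p1.1 p1.2 else d
        if p1.1 == p2.1 && p2.2 < p1.2 then d'.insert p1.1 p1.2 else d') d)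
    PySem.Dict.empty
  -- sorted(list(dst.keys())) — the keys are one-character strings in Python;
  -- sorted by code points (= Python's string order, PYSEM: '<' on s.toList)
  PySem.List.sorted (dst.keys.map (fun c => String.mk [c])) String.toList

-- ===== PORT B =====
def remove_letters_alt (letters : List String) (word : String) : List String :=
  let lcount := PySem.Dict.counter (PySem.Chars.join [] (letters.map String.toList))
  let wcount := PySem.Dict.counter word.toList
  -- Counter(lcount) - Counter(wcount): the keys of lcount whose count strictly exceeds
  -- their count in wcount, in lcount order (Counter.__sub__ keeps exactly the positive
  -- differences; keys only in wcount have a non-positive difference, so they never appear)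
  let diffKeys := (lcount.items.filter (fun p => decide (wcount.getD p.1 0 < p.2))).map Prod.fst
  -- sorted(diff), by code points (= Python's string order, PYSEM: '<' on s.toList)
  PySem.List.sorted (diffKeys.map (fun c => String.mk [c])) String.toList

-- ===== PRECONDITION & SPEC =====
-- When word = "" (and letters contain at least one character) A returns [] because its
-- inner loop over word's items never runs, while B returns the sorted distinct letters,
-- the intended value since an empty word removes nothing.
def D_remove_letters (letters : List String) (word : String) : Prop :=
  word = "" ∧ (letters.map String.toList).flatten ≠ []
instance (letters : List String) (word : String) : Decidable (D_remove_letters letters word) := by unfold D_remove_letters; infer_instance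

def Spec_remove_letters (letters : List String) (word : String) (out : List String) : Prop := ¬ D_remove_letters letters word → out = remove_letters_alt letters word
instance (letters : List String) (word : String) (out : List String) : Decidable (Spec_remove_letters letters word out) := by unfold Spec_remove_letters; infer_instance

def pvDiffWitness_remove_letters : List String × String := (["ba"], "")
def pvDiffWitnessOut_remove_letters : (List String) × (List String) := ([], ["a", "b"])

-- ===== CLAIM (what is proved, stated in full; the proofs are below) =====
def Claim_unchanged_remove_letters : Prop := ∀ (letters : List String) (word : String), Dom_remove_letters letters word → Spec_remove_letters letters word (remove_letters letters word)
def Claim_changed_remove_letters : Prop := Dom_remove_letters (pvDiffWitness_remove_letters.1) (pvDiffWitness_remove_letters.2) ∧ D_remove_letters (pvDiffWitness_remove_letters.1) (pvDiffWitness_remove_letters.2) ∧ remove_letters (pvDiffWitness_remove_letters.1) (pvDiffWitness_remove_letters.2) = pvDiffWitnessOut_remove_letters.1 ∧ remove_letters_alt (pvDiffWitness_remove_letters.1) (pvDiffWitness_remove_letters.2) = pvDiffWitnessOut_remove_letters.2 ∧ pvDiffWitnessOut_remove_letters.1 ≠ pvDiffWitnessOut_remove_letters.2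
def Claim_exact_remove_letters : Prop := ∀ (letters : List String) (word : String), Dom_remove_letters letters word → D_remove_letters letters word → remove_letters letters word ≠ remove_letters_alt letters word

-- ===== LEMMAS AND PROOFS =====

theorem join_empty_sep (parts : List (List Char)) : PySem.Chars.join [] parts = parts.flatten := by
  induction parts with
  | nil => rfl
  | cons p t ih =>
      cases t with
      | nil => simp [PySem.Chars.join, List.intercalate]
      | cons q u =>
          simp only [PySem.Chars.join, List.intercalate] at *
          simp [List.intersperse] at *
          simp [ih]

-- net effect of the body of A's inner loop for a fixed outer item (k1, v1)
theorem inner_step (wc d : PySem.Dict Char Int) (k1 : Char) (v1 : Int) (p2 : Char × Int) :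
    (let d' := if !(wc.contains k1) then d.insert k1 v1 else d
     if k1 == p2.1 && p2.2 < v1 then d'.insert k1 v1 else d')
    = if (!(wc.contains k1) || (k1 == p2.1 && decide (p2.2 < v1))) then d.insert k1 v1 else d := by
  cases h1 : wc.contains k1 <;> cases h2 : (k1 == p2.1 && decide (p2.2 < v1)) <;>
    simp [h1, h2, PySem.Dict.insert_insert_self]

-- A's inner loop over the word counter's items either inserts (k1, v1) once or leaves d unchanged
theorem inner_loop (wc : PySem.Dict Char Int) (k1 : Char) (v1 : Int) (l : List (Char × Int)) (d : PySem.Dict Char Int) :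
    l.foldl (fun d p2 =>
        let d' := if !(wc.contains k1) then d.insert k1 v1 else d
        if k1 == p2.1 && p2.2 < v1 then d'.insert k1 v1 else d') d
    = if l.isEmpty then d
      else if (!(wc.contains k1) || l.any (fun p => k1 == p.1 && decide (p.2 < v1)))
           then d.insert k1 v1 else d := by
  induction l generalizing d with
  | nil => rfl
  | cons p t ih =>
      simp only [List.foldl_cons]
      rw [inner_step wc d k1 v1 p, ih]
      cases hc : ((!(wc.contains k1)) || (k1 == p.1 && decide (p.2 < v1)))
      · have hnotc : (!(wc.contains k1)) = false := by
          cases hx : (!(wc.contains k1))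
          · rfl
          · rw [hx, Bool.true_or] at hc; exact absurd hc (by simp)
        have hbp : (k1 == p.1 && decide (p.2 < v1)) = false := by
          cases hx : (k1 == p.1 && decide (p.2 < v1))
          · rfl
          · rw [hx, Bool.or_true] at hc; exact absurd hc (by simp)
        simp only [List.isEmpty_cons, Bool.false_eq_true, if_false, List.any_cons,
          hnotc, hbp, Bool.false_or]
        cases ht : t.isEmpty
        · simp only [Bool.false_eq_true, if_false]
        · have : t = [] := List.isEmpty_iff.mp ht
          subst this; simp
      · have hall : ((!(wc.contains k1)) || (p :: t).any (fun q => k1 == q.1 && decide (q.2 < v1))) = true := by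
          rw [List.any_cons, ← Bool.or_assoc, hc, Bool.true_or]
        simp only [List.isEmpty_cons, Bool.false_eq_true, if_false, hall, if_true]
        split_ifs <;> simp [PySem.Dict.insert_insert_self]

-- the condition under which A's inner loop (over the nonempty item list wl) inserts item p
def insCond (wc : PySem.Dict Char Int) (wl : List (Char × Int)) (p : Char × Int) : Bool :=
  !(wc.contains p.1) || wl.any (fun q => p.1 == q.1 && decide (q.2 < p.2))

-- A's outer loop, started from a dict containing none of the (distinct) keys of ps,
-- appends exactly the items selected by insCond
theorem outer_loop (wc : PySem.Dict Char Int) (wl : List (Char × Int)) (hwl : wl ≠ [])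
    (ps : List (Char × Int)) (d : PySem.Dict Char Int)
    (hnd : (ps.map Prod.fst).Nodup)
    (hfresh : ∀ p ∈ ps, d.contains p.1 = false) :
    (ps.foldl (fun d p1 =>
        wl.foldl (fun d p2 =>
          let d' := if !(wc.contains p1.1) then d.insert p1.1 p1.2 else d
          if p1.1 == p2.1 && p2.2 < p1.2 then d'.insert p1.1 p1.2 else d') d) d).items
    = d.items ++ ps.filter (insCond wc wl) := by
  induction ps generalizing d with
  | nil => simp
  | cons p t ih =>
      simp only [List.foldl_cons]
      rw [inner_loop]
      have hne : wl.isEmpty = false := by cases wl <;> simp_all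
      rw [hne]
      simp only [List.map_cons, List.nodup_cons] at hnd
      cases hc : insCond wc wl p
      · have hstep : (!(wc.contains p.1) || wl.any (fun q => p.1 == q.1 && decide (q.2 < p.2))) = false := hc
        simp only [Bool.false_eq_true, if_false, hstep]
        rw [ih d hnd.2 (fun q hq => hfresh q (by simp [hq]))]
        simp [List.filter_cons, hc]
      · have hstep : (!(wc.contains p.1) || wl.any (fun q => p.1 == q.1 && decide (q.2 < p.2))) = true := hc
        simp only [Bool.false_eq_true, if_false, hstep, if_true]
        rw [ih (d.insert p.1 p.2) hnd.2 ?_]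
        · rw [PySem.Dict.items_insert_of_not_contains d p.2 (hfresh p (by simp))]
          simp [List.filter_cons, hc]
        · intro q hq
          rw [PySem.Dict.contains_insert]
          have h1 := hfresh q (by simp [hq])
          have h2 : q.1 ≠ p.1 := fun h => hnd.1 (h ▸ List.mem_map_of_mem hq)
          simp [h1, h2]

-- on items of the letters counter, insCond coincides with B's positive-difference test
theorem insCond_eq (w s : List Char) (p : Char × Int)
    (hp : p ∈ (PySem.Dict.counter s).items) :
    insCond (PySem.Dict.counter w) (PySem.Dict.counter w).items p
      = decide ((PySem.Dict.counter w).getD p.1 0 < p.2) := by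
  rw [PySem.Dict.items_counter] at hp
  rcases List.mem_map.mp hp with ⟨k, hk, hpk⟩
  have hks : k ∈ s := (PySem.Set.mem_ofList s k).mp hk
  subst hpk
  simp only [insCond, PySem.Dict.items_counter, PySem.Dict.contains_counter,
    PySem.Dict.getD_counter, List.any_map, Function.comp]
  by_cases hmem : k ∈ w
  · have hcont : w.contains k = true := by simpa using hmem
    simp only [hcont, Bool.not_true, Bool.false_or]
    cases hlt : decide ((w.count k : Int) < (s.count k : Int))
    · rw [List.any_eq_false]
      intro q hq
      simp only [Function.comp_apply, Bool.and_eq_true, beq_iff_eq, decide_eq_true_eq, not_and]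
      intro hbeq hlt2
      rw [← hbeq] at hlt2
      exact absurd hlt2 (by simpa using hlt)
    · rw [List.any_eq_true]
      exact ⟨k, (PySem.Set.mem_ofList w k).mpr hmem, by simp [of_decide_eq_true hlt]⟩
  · have hcont : w.contains k = false := by simpa using hmem
    have hcnt : w.count k = 0 := List.count_eq_zero.mpr hmem
    have hpos : (0 : Int) < s.count k := by
      have := List.count_pos_iff.mpr hks
      exact_mod_cast this
    simp [hcont, hcnt, hmem, hks]

-- ===== VERDICT (by name: the statement is the Claim_ definition above) =====
theorem remove_letters_spec : Claim_unchanged_remove_letters := by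
  intro letters word _ hnd
  by_cases hw : word = ""
  · subst hw
    have hflat : (letters.map String.toList).flatten = [] := by
      by_contra h
      exact hnd ⟨rfl, h⟩
    simp only [remove_letters, remove_letters_alt, join_empty_sep, hflat]
    rfl
  · have hwl : word.toList ≠ [] := fun h => hw (String.toList_eq_nil_iff.mp h)
    simp only [remove_letters, remove_letters_alt, join_empty_sep]
    set s := (letters.map String.toList).flatten with hs
    have hitems : ((PySem.Dict.counter s).items.foldl (fun d p1 =>
        (PySem.Dict.counter word.toList).items.foldl (fun d p2 =>
          let d' := if !((PySem.Dict.counter word.toList).contains p1.1) then d.insert p1.1 p1.2 else d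
          if p1.1 == p2.1 && p2.2 < p1.2 then d'.insert p1.1 p1.2 else d') d)
        PySem.Dict.empty).items
        = (PySem.Dict.counter s).items.filter
            (insCond (PySem.Dict.counter word.toList) (PySem.Dict.counter word.toList).items) := by
      rw [outer_loop _ _ ?_ _ _ ?_ ?_]
      · exact List.nil_append _
      · intro h
        have : (PySem.Set.ofList word.toList : List Char) = [] := by
          have := congrArg (List.map Prod.fst) h
          simpa [PySem.Dict.items_counter] using this
        cases hcase : word.toList with
        | nil => exact hwl hcase
        | cons c cs =>
            have : c ∈ (PySem.Set.ofList word.toList : List Char) :=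
              (PySem.Set.mem_ofList _ c).mpr (by simp [hcase])
            simp_all
      · have : (PySem.Dict.counter s).items.map Prod.fst = PySem.Set.ofList s := by
          rw [PySem.Dict.items_counter, List.map_map]
          simp [Function.comp_def]
        rw [this]
        exact PySem.Set.nodup_ofList s
      · intro p _
        exact PySem.Dict.contains_empty p.1
    simp only [PySem.Dict.keys, hitems]
    rw [List.filter_congr (fun p hp => insCond_eq word.toList s p hp)]

theorem remove_letters_changed : Claim_changed_remove_letters := by
  unfold Claim_changed_remove_letters; decide

theorem remove_letters_tight : Claim_exact_remove_letters := by
  intro letters word _ hd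
  obtain ⟨hw, hflat⟩ := hd
  subst hw
  simp only [remove_letters, remove_letters_alt, join_empty_sep]
  set s := (letters.map String.toList).flatten with hs
  -- A's side: the word counter has no items, so the inner loop never runs and dst stays empty
  have hempty : (PySem.Dict.counter ("".toList)).items = [] := rfl
  simp only [hempty, List.foldl_nil, List.foldl_fixed]
  -- B's side: every item of the letters counter survives the filter, and there is at least one
  intro hBeq
  have hsne : s ≠ [] := hflat
  have hfilter : ((PySem.Dict.counter s).items.filter
      (fun p => decide ((PySem.Dict.counter ("".toList)).getD p.1 0 < p.2)))
      = (PySem.Dict.counter s).items := by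
    apply List.filter_eq_self.mpr
    intro p hp
    rw [PySem.Dict.items_counter] at hp
    rcases List.mem_map.mp hp with ⟨k, hk, hpk⟩
    subst hpk
    have hks : k ∈ s := (PySem.Set.mem_ofList s k).mp hk
    have hpos : (0 : Int) < s.count k := by exact_mod_cast List.count_pos_iff.mpr hks
    have hget : (PySem.Dict.counter ("".toList)).getD k 0 = 0 := rfl
    simp [hks]
  rw [hfilter] at hBeq
  have hnonempty : (PySem.Dict.counter s).items ≠ [] := by
    cases hcase : s with
    | nil => exact absurd hcase hsne
    | cons c cs =>
        intro h
        have : c ∈ (PySem.Set.ofList s : List Char) := (PySem.Set.mem_ofList s c).mpr (by simp [hcase])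
        rw [PySem.Dict.items_counter] at h
        have := congrArg (List.map Prod.fst) h
        simp_all
  have hperm := PySem.List.sorted_perm ((((PySem.Dict.counter s).items).map Prod.fst).map (fun c => String.mk [c])) String.toList false
  rw [← hBeq] at hperm
  have := hperm.symm.eq_nil
  simp_all
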